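-- pv_equiv track=rewrite | github.com/harshuu090/Code_Encryption_Decryption_Generator | file_manager.py | _remove_file_headers_footers
-- ===== SOURCE A (Python) =====
-- def _remove_file_headers_footers(content):
--     """Remove automatically generated headers and footers from file content."""
--     lines = content.split('\n')
--
--     # Remove header (between first """ and next """)
--     start_remove = -1
--     end_remove = -1
--     quote_count = 0
--
--     for i, line in enumerate(lines):
--         if '"""' in line:
--             quote_count += 1
--             if quote_count == 1:
--                 start_remove = i
--             elif quote_count == 2:
--                 end_remove = i
--                 break
--
--     if start_remove != -1 and end_remove != -1:
--         # Remove header section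
--         lines = lines[:start_remove] + lines[end_remove + 1:]
--
--     # Remove footer (last """ section)
--     quote_count = 0
--     start_remove = -1
--
--     for i in range(len(lines) - 1, -1, -1):
--         if '"""' in lines[i]:
--             quote_count += 1
--             if quote_count == 1:
--                 start_remove = i
--             elif quote_count == 2:
--                 lines = lines[:i] + lines[start_remove + 1:]
--                 break
--
--     # Remove empty lines at the beginning and end
--     while lines and not lines[0].strip():
--         lines.pop(0)
--
--     while lines and not lines[-1].strip():
--         lines.pop()
--
--     return '\n'.join(lines)
-- ===== SOURCE B (Python) =====
-- def _remove_file_headers_footers(content):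
--     """Remove automatically generated headers and footers from file content."""
--     lines = content.split('\n')
--
--     # Header: drop the inclusive block between the first two quote-bearing lines.
--     q = [i for i, l in enumerate(lines) if '"""' in l]
--     if len(q) >= 2:
--         lines = lines[:q[0]] + lines[q[1] + 1:]
--
--     # Footer: recompute on the new lines; drop the block between the last two.
--     q = [i for i, l in enumerate(lines) if '"""' in l]
--     if len(q) >= 2:
--         lines = lines[:q[-2]] + lines[q[-1] + 1:]
--
--     # Trim blank edge lines by slicing between the first and last non-blank lines.
--     keep = [i for i, l in enumerate(lines) if l.strip()]
--     lines = lines[keep[0]:keep[-1] + 1] if keep else []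
--
--     return '\n'.join(lines)
-- ===== Notes on version B (the rewrite author's own statement) =====
-- stated objective: alternative
-- what changed: Replaces A's two directional state-machine scans (forward/backward with quote_count and break) and its two edge pop-while loops by index tables built once per stage -- the quote-line index list sliced at its first two / last two entries, and the non-blank index list sliced between its first and last entry.
import Mathlib
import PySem

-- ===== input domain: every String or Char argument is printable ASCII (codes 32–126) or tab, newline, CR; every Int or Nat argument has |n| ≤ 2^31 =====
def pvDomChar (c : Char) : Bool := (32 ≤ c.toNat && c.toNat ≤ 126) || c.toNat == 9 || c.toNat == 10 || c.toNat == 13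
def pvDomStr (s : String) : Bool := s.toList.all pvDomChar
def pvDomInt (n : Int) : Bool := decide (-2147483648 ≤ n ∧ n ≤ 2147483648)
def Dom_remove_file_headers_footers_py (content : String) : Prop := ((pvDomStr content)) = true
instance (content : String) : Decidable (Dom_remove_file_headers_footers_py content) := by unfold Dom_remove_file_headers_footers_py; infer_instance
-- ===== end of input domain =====

-- B replaces A's two directional state-machine scans and edge pop-loops by index tables
-- (quote-line / non-blank-line index lists) plus slicing; same cost, different decomposition.

-- ===== PORT A =====

-- forward header scan: for i, line in enumerate(lines): … (state: start_remove, end_remove, quote_count; breaks at the 2nd quote line)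
def pvHdrLoopA : Int → List String → Int → Int → Int → Int × Int
  | _, [], s, e, _ => (s, e)
  | i, l :: rest, s, e, qc =>
    if PySem.Str.isIn "\"\"\"" l then
      let qc' := qc + 1
      if qc' == 1 then pvHdrLoopA (i+1) rest i e qc'
      else if qc' == 2 then (s, i)          -- end_remove := i; break
      else pvHdrLoopA (i+1) rest s e qc'    -- unreachable (loop breaks at 2)
    else pvHdrLoopA (i+1) rest s e qc

-- backward footer scan over the index list range(len-1, -1, -1); lines[i] is always in range, ported as pyGetD
def pvFtrLoopA (lines : List String) : List Int → Int → Int → List String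
  | [], _, _ => lines
  | i :: rest, qc, s =>
    if PySem.Str.isIn "\"\"\"" (PySem.List.pyGetD lines i "") then
      let qc' := qc + 1
      if qc' == 1 then pvFtrLoopA lines rest qc' i
      else if qc' == 2 then
        PySem.List.slice lines none (some i) ++ PySem.List.slice lines (some (s+1)) none  -- lines[:i] + lines[start_remove+1:]; break
      else pvFtrLoopA lines rest qc' s      -- unreachable (loop breaks at 2)
    else pvFtrLoopA lines rest qc s

-- while lines and not lines[0].strip(): lines.pop(0)
def pvTrimFrontA : List String → List String
  | [] => []
  | l :: rest => if PySem.Str.strip l == "" then pvTrimFrontA rest else l :: rest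

-- while lines and not lines[-1].strip(): lines.pop()
def pvTrimBackA (lines : List String) : List String :=
  match h : lines.getLast? with
  | none => lines
  | some l => if PySem.Str.strip l == "" then pvTrimBackA lines.dropLast else lines
termination_by lines.length
decreasing_by
  cases lines with
  | nil => simp at h
  | cons a t => simp [List.length_dropLast]

def remove_file_headers_footers_py (content : String) : String :=
  let lines := (PySem.Str.split? content "\n").getD []      -- sep is non-empty, split? is some
  let se := pvHdrLoopA 0 lines (-1) (-1) 0
  let lines := if se.1 != -1 && se.2 != -1 then
      PySem.List.slice lines none (some se.1) ++ PySem.List.slice lines (some (se.2 + 1)) none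
    else lines
  let lines := pvFtrLoopA lines (PySem.List.pyRange ((lines.length : Int) - 1) (-1) (-1)) 0 (-1)
  let lines := pvTrimFrontA lines
  let lines := pvTrimBackA lines
  PySem.Str.join "\n" lines

-- ===== PORT B =====

-- q = [i for i, l in enumerate(lines) if '"""' in l]
def pvQuoteIdxB (lines : List String) : List Int :=
  ((PySem.List.enumerate lines 0).filter (fun p => PySem.Str.isIn "\"\"\"" p.2)).map (·.1)

def remove_file_headers_footers_py_alt (content : String) : String :=
  let lines := (PySem.Str.split? content "\n").getD []      -- sep is non-empty, split? is some
  let q := pvQuoteIdxB lines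
  let lines := if q.length ≥ 2 then
      PySem.List.slice lines none (some (PySem.List.pyGetD q 0 0)) ++
        PySem.List.slice lines (some (PySem.List.pyGetD q 1 0 + 1)) none
    else lines
  let q := pvQuoteIdxB lines
  let lines := if q.length ≥ 2 then
      PySem.List.slice lines none (some (PySem.List.pyGetD q (-2) 0)) ++
        PySem.List.slice lines (some (PySem.List.pyGetD q (-1) 0 + 1)) none
    else lines
  let keep := ((PySem.List.enumerate lines 0).filter (fun p => !(PySem.Str.strip p.2 == ""))).map (·.1)
  let lines := if keep ≠ [] then
      PySem.List.slice lines (some (PySem.List.pyGetD keep 0 0)) (some (PySem.List.pyGetD keep (-1) 0 + 1))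
    else []
  PySem.Str.join "\n" lines

-- ===== PRECONDITION & SPEC =====
def Spec_remove_file_headers_footers_py (content : String) (out : String) : Prop := out = remove_file_headers_footers_py_alt content
instance (content : String) (out : String) : Decidable (Spec_remove_file_headers_footers_py content out) := by unfold Spec_remove_file_headers_footers_py; infer_instance

-- ===== CLAIM (what is proved, stated in full; the proofs are below) =====
def Claim_equal_remove_file_headers_footers_py : Prop := ∀ (content : String), Dom_remove_file_headers_footers_py content → Spec_remove_file_headers_footers_py content (remove_file_headers_footers_py content)

-- ===== LEMMAS AND PROOFS =====

-- index table of the positions (counted from k) whose line satisfies p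
def pvIdxFrom (p : String → Bool) (k : Int) : List String → List Int
  | [] => []
  | l :: ls => if p l then k :: pvIdxFrom p (k+1) ls else pvIdxFrom p (k+1) ls

theorem pvIdxFrom_eq_enum (p : String → Bool) (ls : List String) (k : Int) :
    ((PySem.List.enumerate ls k).filter (fun x => p x.2)).map (·.1) = pvIdxFrom p k ls := by
  induction ls generalizing k with
  | nil => simp [pvIdxFrom, PySem.List.enumerate]
  | cons l ls ih =>
    rw [PySem.List.enumerate_cons]
    by_cases h : p l <;> simp [pvIdxFrom, h, ih]

theorem pvIdxFrom_le (p : String → Bool) (ls : List String) (k : Int) :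
    ∀ x ∈ pvIdxFrom p k ls, k ≤ x := by
  induction ls generalizing k with
  | nil => simp [pvIdxFrom]
  | cons l ls ih =>
    intro x hx
    by_cases h : p l <;> simp [pvIdxFrom, h] at hx
    · rcases hx with rfl | hx
      · omega
      · have := ih (k+1) x hx; omega
    · have := ih (k+1) x hx; omega

-- ----- header -----

theorem pvHdr1 (ls : List String) (k s e : Int) :
    pvHdrLoopA k ls s e 1 =
      match pvIdxFrom (PySem.Str.isIn "\"\"\"") k ls with
      | [] => (s, e)
      | b :: _ => (s, b) := by
  induction ls generalizing k with
  | nil => simp [pvHdrLoopA, pvIdxFrom]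
  | cons l ls ih =>
    by_cases h : PySem.Str.isIn "\"\"\"" l <;>
      [ (simp only [PySem.Str.isIn_eq] at h; simp at h; simp [pvHdrLoopA, pvIdxFrom, h, ih]);
        (simp only [PySem.Str.isIn_eq] at h; simp at h; simp [pvHdrLoopA, pvIdxFrom, h, ih]) ]

theorem pvHdr0 (ls : List String) (k e : Int) :
    pvHdrLoopA k ls (-1) e 0 =
      match pvIdxFrom (PySem.Str.isIn "\"\"\"") k ls with
      | [] => (-1, e)
      | [a] => (a, e)
      | a :: b :: _ => (a, b) := by
  induction ls generalizing k with
  | nil => simp [pvHdrLoopA, pvIdxFrom]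
  | cons l ls ih =>
    by_cases h : PySem.Str.isIn "\"\"\"" l
    · simp only [PySem.Str.isIn_eq] at h; simp at h
      rw [show pvHdrLoopA k (l::ls) (-1) e 0 = pvHdrLoopA (k+1) ls k e 1 by
        simp [pvHdrLoopA, h]]
      rw [pvHdr1]
      simp only [pvIdxFrom, PySem.Str.isIn_eq, h, if_pos]
      cases hq : pvIdxFrom (PySem.Str.isIn "\"\"\"") (k+1) ls <;> simp [hq, h]
    · simp only [PySem.Str.isIn_eq] at h; simp at h
      simp [pvHdrLoopA, pvIdxFrom, h, ih]

theorem pvHeaderEq (ls : List String) :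
    (if (pvHdrLoopA 0 ls (-1) (-1) 0).1 != -1 && (pvHdrLoopA 0 ls (-1) (-1) 0).2 != -1 then
        PySem.List.slice ls none (some (pvHdrLoopA 0 ls (-1) (-1) 0).1) ++
          PySem.List.slice ls (some ((pvHdrLoopA 0 ls (-1) (-1) 0).2 + 1)) none
      else ls)
    = (if (pvQuoteIdxB ls).length ≥ 2 then
        PySem.List.slice ls none (some (PySem.List.pyGetD (pvQuoteIdxB ls) 0 0)) ++
          PySem.List.slice ls (some (PySem.List.pyGetD (pvQuoteIdxB ls) 1 0 + 1)) none
      else ls) := by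
  have hq : pvQuoteIdxB ls = pvIdxFrom (PySem.Str.isIn "\"\"\"") 0 ls :=
    pvIdxFrom_eq_enum _ ls 0
  rw [pvHdr0, hq]
  cases hqq : pvIdxFrom (PySem.Str.isIn "\"\"\"") 0 ls with
  | nil => simp
  | cons a t =>
    cases t with
    | nil => simp
    | cons b t2 =>
      have ha : 0 ≤ a := pvIdxFrom_le _ ls 0 a (by rw [hqq]; simp)
      have hb : 0 ≤ b := pvIdxFrom_le _ ls 0 b (by rw [hqq]; simp)
      simp [PySem.List.pyGetD, PySem.List.pyGet?, PySem.List.pyIdx?,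
        show a ≠ -1 by omega, show b ≠ -1 by omega,
        show (0:Int) ≤ (t2.length:Int) + 1 by positivity]

-- ----- footer -----

theorem pvFtr1 (lines : List String) (idxs : List Int) (s : Int) :
    pvFtrLoopA lines idxs 1 s =
      match idxs.filter (fun i => PySem.Str.isIn "\"\"\"" (PySem.List.pyGetD lines i "")) with
      | [] => lines
      | b :: _ => PySem.List.slice lines none (some b) ++ PySem.List.slice lines (some (s+1)) none := by
  induction idxs with
  | nil => simp [pvFtrLoopA]
  | cons i rest ih =>
    by_cases h : PySem.Str.isIn "\"\"\"" (PySem.List.pyGetD lines i "")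
    · simp only [PySem.Str.isIn_eq] at h; simp at h
      simp [pvFtrLoopA, List.filter, h]
    · simp only [PySem.Str.isIn_eq] at h; simp at h
      simp [pvFtrLoopA, List.filter, h, ih]

theorem pvFtr0 (lines : List String) (idxs : List Int) (s : Int) :
    pvFtrLoopA lines idxs 0 s =
      match idxs.filter (fun i => PySem.Str.isIn "\"\"\"" (PySem.List.pyGetD lines i "")) with
      | [] => lines
      | [_] => lines
      | a :: b :: _ => PySem.List.slice lines none (some b) ++ PySem.List.slice lines (some (a+1)) none := by
  induction idxs with
  | nil => simp [pvFtrLoopA]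
  | cons i rest ih =>
    by_cases h : PySem.Str.isIn "\"\"\"" (PySem.List.pyGetD lines i "")
    · simp only [PySem.Str.isIn_eq] at h; simp at h
      rw [show pvFtrLoopA lines (i :: rest) 0 s = pvFtrLoopA lines rest 1 i by
        simp [pvFtrLoopA, h]]
      rw [pvFtr1]
      simp only [List.filter, h]
      cases hq : rest.filter
          (fun j => PySem.Str.isIn "\"\"\"" (PySem.List.pyGetD lines j "")) <;>
        simp [hq, h]
    · simp only [PySem.Str.isIn_eq] at h; simp at h
      simp [pvFtrLoopA, List.filter, h, ih]

theorem pvRangeFilter (p : String → Bool) (lines : List String) :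
    (PySem.List.pyRange 0 (lines.length : Int) 1).filter (fun i => p (PySem.List.pyGetD lines i "")) =
      pvIdxFrom p 0 lines := by
  rw [← pvIdxFrom_eq_enum p lines 0,
    PySem.List.enumerate_eq_map_pyRange lines "", List.filter_map, List.map_map]
  simp [Function.comp_def, PySem.List.len]

theorem pvRangeFilterRev (p : String → Bool) (lines : List String) :
    (PySem.List.pyRange ((lines.length : Int) - 1) (-1) (-1)).filter
        (fun i => p (PySem.List.pyGetD lines i "")) =
      (pvIdxFrom p 0 lines).reverse := by
  have h : PySem.List.pyRange ((lines.length : Int) - 1) (-1) (-1) =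
      (PySem.List.pyRange 0 (lines.length : Int) 1).reverse := by
    have := PySem.List.pyRange_neg_one_eq_reverse ((lines.length : Int) - 1) (-1)
    simpa using this
  rw [h, List.filter_reverse, pvRangeFilter]

theorem pvGetD_neg_one {xs : List Int} {y : Int} (d : Int) :
    PySem.List.pyGetD (xs ++ [y]) (-1) d = y := by
  simp [PySem.List.pyGetD, PySem.List.pyGet?, PySem.List.pyIdx?,
    show ¬ ((0:Int) ≤ -1) by omega,
    show (-((xs.length:Int) + 1) ≤ -1) by omega]

theorem pvGetD_neg_two {xs : List Int} {b a : Int} (d : Int) :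
    PySem.List.pyGetD (xs ++ [b, a]) (-2) d = b := by
  simp [PySem.List.pyGetD, PySem.List.pyGet?, PySem.List.pyIdx?,
    show ¬ ((0:Int) ≤ -2) by omega,
    show (-((xs.length:Int) + 2) ≤ -2) by omega,
    List.getElem?_append, List.getElem?_append_right]

theorem pvFooterEq (lines : List String) :
    pvFtrLoopA lines (PySem.List.pyRange ((lines.length : Int) - 1) (-1) (-1)) 0 (-1) =
      (if (pvQuoteIdxB lines).length ≥ 2 then
        PySem.List.slice lines none (some (PySem.List.pyGetD (pvQuoteIdxB lines) (-2) 0)) ++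
          PySem.List.slice lines (some (PySem.List.pyGetD (pvQuoteIdxB lines) (-1) 0 + 1)) none
      else lines) := by
  have hq : pvQuoteIdxB lines = pvIdxFrom (PySem.Str.isIn "\"\"\"") 0 lines :=
    pvIdxFrom_eq_enum _ lines 0
  rw [pvFtr0, pvRangeFilterRev, hq]
  cases hrev : (pvIdxFrom (PySem.Str.isIn "\"\"\"") 0 lines).reverse with
  | nil =>
    have hlist : pvIdxFrom (PySem.Str.isIn "\"\"\"") 0 lines = [] := by
      simpa using congrArg List.reverse hrev
    simp [hlist]
  | cons a t =>
    cases t with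
    | nil =>
      have hlist : pvIdxFrom (PySem.Str.isIn "\"\"\"") 0 lines = [a] := by
        simpa using congrArg List.reverse hrev
      simp [hlist]
    | cons b t2 =>
      have hlist : pvIdxFrom (PySem.Str.isIn "\"\"\"") 0 lines = (t2.reverse ++ [b]) ++ [a] := by
        simpa using congrArg List.reverse hrev
      have e1 : PySem.List.pyGetD ((t2.reverse ++ [b]) ++ [a]) (-1) 0 = a := pvGetD_neg_one 0
      have e2 : PySem.List.pyGetD ((t2.reverse ++ [b]) ++ [a]) (-2) 0 = b := by
        simpa using pvGetD_neg_two (xs := t2.reverse) (b := b) (a := a) 0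
      rw [hlist, e1, e2, if_pos (by simp)]

-- ----- trim -----

theorem pvTrimFront_eq (ls : List String) :
    pvTrimFrontA ls = ls.dropWhile (fun l => PySem.Str.strip l == "") := by
  induction ls with
  | nil => rfl
  | cons l ls ih =>
    by_cases h : PySem.Str.strip l == "" <;> simp [pvTrimFrontA, List.dropWhile, h, ih]

theorem pvTrimBack_eq (ls : List String) :
    pvTrimBackA ls = (ls.reverse.dropWhile (fun l => PySem.Str.strip l == "")).reverse := by
  induction ls using List.reverseRecOn with
  | nil => simp [pvTrimBackA]
  | append_singleton xs x ih =>
    rw [pvTrimBackA.eq_def]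
    split
    · rename_i h
      simp [List.getLast?_concat] at h
    · rename_i l h
      rw [List.getLast?_concat] at h
      obtain rfl : x = l := by injection h
      by_cases hb : PySem.Str.strip x == ""
      · simp [hb, List.dropLast_concat, ih, List.dropWhile_append]
      · simp [hb]

-- all-blank / head / order lemmas about the index table, used to equate the pop-loops with the keep-slice
theorem pvIdxFrom_nil_iff (p : String → Bool) (ls : List String) (k : Int) :
    pvIdxFrom p k ls = [] ↔ ∀ l ∈ ls, p l = false := by
  induction ls generalizing k with
  | nil => simp [pvIdxFrom]
  | cons l ls ih =>
    by_cases h : p l <;> simp [pvIdxFrom, h, ih]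

theorem pvIdxFrom_head (p : String → Bool) (ls : List String) (k a : Int) (rest : List Int)
    (hq : pvIdxFrom p k ls = a :: rest) :
    ls.dropWhile (fun l => !(p l)) = ls.drop (a - k).toNat ∧
      pvIdxFrom p a (ls.drop (a - k).toNat) = a :: rest := by
  induction ls generalizing k with
  | nil => simp [pvIdxFrom] at hq
  | cons l ls ih =>
    by_cases h : p l
    · simp only [pvIdxFrom, h, if_pos] at hq
      obtain ⟨rfl, rfl⟩ : k = a ∧ pvIdxFrom p (k+1) ls = rest := by
        exact ⟨(List.cons.injEq _ _ _ _ ▸ hq).1, (List.cons.injEq _ _ _ _ ▸ hq).2⟩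
      constructor
      · simp [List.dropWhile_cons, h]
      · simp only [sub_self, Int.toNat_zero, List.drop_zero, pvIdxFrom, h, if_pos]
    · simp only [pvIdxFrom, h, if_neg, Bool.false_eq_true, not_false_iff] at hq
      have hk1 : k + 1 ≤ a := pvIdxFrom_le p ls (k+1) a (by rw [hq]; simp)
      obtain ⟨ih1, ih2⟩ := ih (k+1) hq
      have ht : (a - k).toNat = (a - (k+1)).toNat + 1 := by omega
      constructor
      · rw [List.dropWhile_cons]
        simp only [h, Bool.not_false, if_pos, ht, List.drop_succ_cons]
        exact ih1
      · rw [ht, List.drop_succ_cons]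
        exact ih2

theorem pvIdxFrom_rest_gt (p : String → Bool) (ls : List String) (k a : Int) (rest : List Int)
    (hq : pvIdxFrom p k ls = a :: rest) : ∀ x ∈ rest, a < x := by
  induction ls generalizing k with
  | nil => simp [pvIdxFrom] at hq
  | cons l ls ih =>
    by_cases h : p l
    · simp only [pvIdxFrom, h, if_pos, List.cons.injEq] at hq
      obtain ⟨rfl, hrest⟩ := hq
      intro x hx
      have := pvIdxFrom_le p ls (k+1) x (hrest ▸ hx)
      omega
    · simp only [pvIdxFrom, h, if_neg, Bool.false_eq_true, not_false_iff] at hq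
      exact ih (k+1) hq

theorem pvIdxFrom_last (p : String → Bool) (ls : List String) (k m : Int)
    (hm : (pvIdxFrom p k ls).getLast? = some m) :
    (ls.reverse.dropWhile (fun l => !(p l))).reverse = ls.take (m - k + 1).toNat := by
  induction ls generalizing k with
  | nil => simp [pvIdxFrom] at hm
  | cons l ls ih =>
    cases hq : pvIdxFrom p (k+1) ls with
    | nil =>
      have hall : ∀ x ∈ ls, p x = false := (pvIdxFrom_nil_iff p ls (k+1)).1 hq
      by_cases h : p l
      · have : pvIdxFrom p k (l :: ls) = [k] := by simp [pvIdxFrom, h, hq]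
        rw [this] at hm
        simp only [List.getLast?_singleton, Option.some.injEq] at hm
        subst hm
        have hnil : ls.reverse.dropWhile (fun l => !(p l)) = [] := by
          rw [List.dropWhile_eq_nil_iff]
          intro x hx
          simp [hall x (List.mem_reverse.mp hx)]
        simp [List.reverse_cons, List.dropWhile_append, hnil, List.dropWhile_cons, h]
      · have : pvIdxFrom p k (l :: ls) = [] := by simp [pvIdxFrom, h, hq]
        rw [this] at hm; simp at hm
    | cons a rest =>
      have hm' : (pvIdxFrom p (k+1) ls).getLast? = some m := by
        rcases (by by_cases h : p l <;> simp [pvIdxFrom, h, hq] :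
            pvIdxFrom p k (l :: ls) = k :: a :: rest ∨ pvIdxFrom p k (l :: ls) = a :: rest) with
          h1 | h1 <;> rw [h1] at hm <;> rw [hq] <;> simpa using hm
      have hmk : k + 1 ≤ m := by
        have hmem : m ∈ pvIdxFrom p (k+1) ls := List.mem_of_getLast? hm'
        exact pvIdxFrom_le p ls (k+1) m hmem
      have ihm := ih (k+1) hm'
      have hne : ls.reverse.dropWhile (fun l => !(p l)) ≠ [] := by
        intro hcon
        have hall := List.dropWhile_eq_nil_iff.mp hcon
        have : pvIdxFrom p (k+1) ls = [] := by
          rw [pvIdxFrom_nil_iff]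
          intro x hx
          have := hall x (List.mem_reverse.mpr hx)
          simpa using this
        rw [this] at hq; cases hq
      have ht : (m - k + 1).toNat = (m - (k+1) + 1).toNat + 1 := by omega
      rw [List.reverse_cons, List.dropWhile_append,
        if_neg (by simpa [List.isEmpty_iff] using hne),
        List.reverse_append, ihm, ht]
      simp

theorem pvTrimEq (ls : List String) :
    pvTrimBackA (pvTrimFrontA ls) =
      (if (((PySem.List.enumerate ls 0).filter (fun p => !(PySem.Str.strip p.2 == ""))).map (·.1)) ≠ [] then
        PySem.List.slice ls
          (some (PySem.List.pyGetD (((PySem.List.enumerate ls 0).filter (fun p => !(PySem.Str.strip p.2 == ""))).map (·.1)) 0 0))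
          (some (PySem.List.pyGetD (((PySem.List.enumerate ls 0).filter (fun p => !(PySem.Str.strip p.2 == ""))).map (·.1)) (-1) 0 + 1))
      else []) := by
  rw [pvTrimFront_eq]
  have hk : ((PySem.List.enumerate ls 0).filter (fun p => !(PySem.Str.strip p.2 == ""))).map (·.1)
      = pvIdxFrom (fun l => !(PySem.Str.strip l == "")) 0 ls := pvIdxFrom_eq_enum (fun l => !(PySem.Str.strip l == "")) ls 0
  rw [hk]
  cases hq : pvIdxFrom (fun l => !(PySem.Str.strip l == "")) 0 ls with
  | nil =>
    have hall := (pvIdxFrom_nil_iff _ ls 0).1 hq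
    have hdrop : ls.dropWhile (fun l => PySem.Str.strip l == "") = [] := by
      rw [List.dropWhile_eq_nil_iff]
      intro x hx
      have := hall x hx
      simpa using this
    rw [hdrop]
    simp [pvTrimBackA]
  | cons a rest =>
    obtain ⟨h1, h2⟩ := pvIdxFrom_head (fun l => !(PySem.Str.strip l == "")) ls 0 a rest hq
    simp only [Bool.not_not, sub_zero] at h1 h2
    have ha0 : 0 ≤ a := pvIdxFrom_le _ ls 0 a (by rw [hq]; simp)
    obtain ⟨m, hm⟩ : ∃ m, (a :: rest).getLast? = some m :=
      ⟨(a :: rest).getLast (by simp), List.getLast?_eq_some_getLast (by simp)⟩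
    have ham : a ≤ m := by
      rcases List.mem_cons.mp (List.mem_of_getLast? hm) with rfl | h
      · exact le_refl _
      · exact le_of_lt (pvIdxFrom_rest_gt _ ls 0 a rest hq m h)
    have hlast := pvIdxFrom_last (fun l => !(PySem.Str.strip l == "")) (ls.drop a.toNat) a m
      (by rw [h2]; exact hm)
    simp only [Bool.not_not] at hlast
    rw [h1, pvTrimBack_eq, hlast]
    have hgd0 : PySem.List.pyGetD (a :: rest) 0 0 = a := by
      simp [PySem.List.pyGetD, PySem.List.pyGet?, PySem.List.pyIdx?]
    have hgdm : PySem.List.pyGetD (a :: rest) (-1) 0 = m := by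
      rw [← List.dropLast_append_getLast? m hm]
      exact pvGetD_neg_one 0
    rw [if_pos (by simp), hgd0, hgdm,
      PySem.List.slice_toNat ls (by omega) (by omega),
      show (m + 1).toNat - a.toNat = (m - a + 1).toNat by omega]

-- ===== VERDICT (by name: the statement is the Claim_ definition above) =====
theorem remove_file_headers_footers_py_spec : Claim_equal_remove_file_headers_footers_py := by
  intro content _
  unfold Spec_remove_file_headers_footers_py remove_file_headers_footers_py remove_file_headers_footers_py_alt
  simp only []
  rw [← pvHeaderEq]
  generalize (if (pvHdrLoopA 0 ((PySem.Str.split? content "\n").getD []) (-1) (-1) 0).1 != -1 && (pvHdrLoopA 0 ((PySem.Str.split? content "\n").getD []) (-1) (-1) 0).2 != -1 then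
        PySem.List.slice ((PySem.Str.split? content "\n").getD []) none (some (pvHdrLoopA 0 ((PySem.Str.split? content "\n").getD []) (-1) (-1) 0).1) ++
          PySem.List.slice ((PySem.Str.split? content "\n").getD []) (some ((pvHdrLoopA 0 ((PySem.Str.split? content "\n").getD []) (-1) (-1) 0).2 + 1)) none
      else ((PySem.Str.split? content "\n").getD [])) = l1
  rw [← pvFooterEq]
  generalize pvFtrLoopA l1 (PySem.List.pyRange ((l1.length : Int) - 1) (-1) (-1)) 0 (-1) = l2
  rw [← pvTrimEq]
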